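-- pv_equiv track=rewrite | github.com/NeuralEnsemble/elephant | elephant/asset/asset.py | synchronous_events_no_overlap
-- ===== SOURCE A (Python) =====
-- def _remove_empty_events(sse):
--     """
--     Given a sequence of synchronous events (SSE) `sse` consisting of a pool of
--     pixel positions and associated synchronous events (see below), returns a
--     copy of `sse` where all empty events have been removed.
--
--     `sse` must be provided as a dictionary of type
--
--     .. centered:: {(i1, j1): S1, (i2, j2): S2, ..., (iK, jK): SK},
--
--     where each `i`, `j` is an integer and each `S` is a set of neuron IDs.
--
--     Parameters
--     ----------
--     sse : dict
--         A dictionary of pixel positions `(i, j)` as keys, and sets `S` of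
--         synchronous events as values (see above).
--
--     Returns
--     -------
--     sse_new : dict
--         A copy of `sse` where all empty events have been removed.
--
--     """
--     sse_new = sse.copy()
--     for pixel, link in sse.items():
--         if link == set([]):
--             del sse_new[pixel]
--
--     return sse_new
--
-- def synchronous_events_no_overlap(sse1, sse2):
--     """
--     Given two sequences of synchronous events (SSEs) `sse1` and `sse2`, each
--     consisting of a pool of pixel positions and associated synchronous events
--     (see below), determines whether `sse1` and `sse2` are disjoint.
--
--     Two SSEs are disjoint if they don't share pixels, or if the events
--     associated to common pixels are disjoint.
--
--     Both `sse1` and `sse2` must be provided as dictionaries of the type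
--
--     .. centered:: {(i1, j1): S1, (i2, j2): S2, ..., (iK, jK): SK},
--
--     where each `i`, `j` is an integer and each `S` is a set of neuron IDs.
--
--     Parameters
--     ----------
--     sse1, sse2 : dict
--         Dictionaries of pixel positions `(i, j)` as keys and sets `S` of
--         synchronous events as values.
--
--     Returns
--     -------
--     bool
--         True if `sse1` is disjoint from `sse2`.
--
--     See Also
--     --------
--     ASSET.extract_synchronous_events : extract SSEs from given spike trains
--
--     """
--     # Remove empty links from sse11 and sse22, if any
--     sse11 = _remove_empty_events(sse1)
--     sse22 = _remove_empty_events(sse2)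
--
--     # If both SSEs are empty, return False (we consider them equal)
--     if sse11 == {} and sse22 == {}:
--         return False
--
--     common_pixels = set(sse11.keys()).intersection(set(sse22.keys()))
--     if len(common_pixels) == 0:
--         return True
--     if all(sse11[p].isdisjoint(sse22[p]) for p in common_pixels):
--         return True
--     return False
-- ===== SOURCE B (Python) =====
-- def synchronous_events_no_overlap(sse1, sse2):
--     # Flatten each SSE into one set of (pixel, neuron) pairs; the SSEs overlap
--     # iff the flattened sets share a pair. Both flattened sets empty means all
--     # event sets were empty: the both-empty sentinel.
--     t1 = {(p, x) for p, s in sse1.items() for x in s}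
--     t2 = {(p, x) for p, s in sse2.items() for x in s}
--     if not t1 and not t2:
--         return False
--     return t1.isdisjoint(t2)
-- ===== Notes on version B (the rewrite author's own statement) =====
-- stated objective: alternative
-- what changed: Instead of filtering empty events, intersecting key sets and testing per-pixel disjointness, B flattens each dict into a single set of (pixel, neuron) pairs and does one global isdisjoint test, with the both-empty sentinel read off the flattened sets.
import Mathlib
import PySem

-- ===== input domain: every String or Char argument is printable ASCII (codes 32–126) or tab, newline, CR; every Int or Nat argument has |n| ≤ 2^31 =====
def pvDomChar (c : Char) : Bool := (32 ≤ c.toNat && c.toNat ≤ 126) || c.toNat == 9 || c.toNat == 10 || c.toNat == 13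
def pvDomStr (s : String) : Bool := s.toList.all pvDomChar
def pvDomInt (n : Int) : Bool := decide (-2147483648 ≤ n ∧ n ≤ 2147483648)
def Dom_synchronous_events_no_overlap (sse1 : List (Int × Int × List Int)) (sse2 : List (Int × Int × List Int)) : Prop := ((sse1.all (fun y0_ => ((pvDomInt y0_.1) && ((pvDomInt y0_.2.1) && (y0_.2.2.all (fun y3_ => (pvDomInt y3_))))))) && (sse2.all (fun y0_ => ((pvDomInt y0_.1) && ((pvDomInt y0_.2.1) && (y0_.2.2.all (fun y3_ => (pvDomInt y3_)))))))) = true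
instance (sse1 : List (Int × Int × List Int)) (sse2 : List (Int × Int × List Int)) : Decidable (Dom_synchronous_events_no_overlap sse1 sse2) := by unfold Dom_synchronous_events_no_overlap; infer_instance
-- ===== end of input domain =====

-- B replaces A's filter/intersect/per-pixel-isdisjoint pipeline by flattening each dict
-- into one set of (pixel, neuron) pairs and a single global isdisjoint test; equal
-- return value on every input.

-- Both ports decode the association-list encoding of the Python dict arguments the
-- same way Python's dict construction does (last value wins, first position kept),
-- with the event sets as PySem.Set.
def pvToDict (sse : List (Int × Int × List Int)) : PySem.Dict (Int × Int) (PySem.Set Int) :=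
  sse.foldl (fun d e => d.insert (e.1, e.2.1) (PySem.Set.ofList e.2.2)) PySem.Dict.empty

-- ===== PORT A =====
-- _remove_empty_events: copy, then delete every pixel whose event set == set([])
def pvRemoveEmpty (d : PySem.Dict (Int × Int) (PySem.Set Int)) : PySem.Dict (Int × Int) (PySem.Set Int) :=
  d.items.foldl (fun acc e => if PySem.Set.equal e.2 PySem.Set.empty then acc.erase e.1 else acc) d

def pvNoOverlapA (d1 d2 : PySem.Dict (Int × Int) (PySem.Set Int)) : Bool :=
  let sse11 := pvRemoveEmpty d1
  let sse22 := pvRemoveEmpty d2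
  if sse11 = PySem.Dict.empty ∧ sse22 = PySem.Dict.empty then false
  else
    let common := PySem.Set.inter (PySem.Set.ofList sse11.keys) (PySem.Set.ofList sse22.keys)
    if PySem.Set.len common = 0 then true
    else if common.all (fun p => PySem.Set.isdisjoint (sse11.getD p PySem.Set.empty) (sse22.getD p PySem.Set.empty)) then true
    else false

def synchronous_events_no_overlap (sse1 : List (Int × Int × List Int)) (sse2 : List (Int × Int × List Int)) : Bool :=
  pvNoOverlapA (pvToDict sse1) (pvToDict sse2)

-- ===== PORT B =====
-- {(p, x) for p, s in d.items() for x in s}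
def pvFlat (d : PySem.Dict (Int × Int) (PySem.Set Int)) : PySem.Set ((Int × Int) × Int) :=
  PySem.Set.ofList (d.items.flatMap (fun e => e.2.map (fun x => (e.1, x))))

def pvNoOverlapB (d1 d2 : PySem.Dict (Int × Int) (PySem.Set Int)) : Bool :=
  let t1 := pvFlat d1
  let t2 := pvFlat d2
  if t1.isEmpty ∧ t2.isEmpty then false
  else PySem.Set.isdisjoint t1 t2

def synchronous_events_no_overlap_alt (sse1 : List (Int × Int × List Int)) (sse2 : List (Int × Int × List Int)) : Bool :=
  pvNoOverlapB (pvToDict sse1) (pvToDict sse2)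

-- ===== PRECONDITION & SPEC =====
def Spec_synchronous_events_no_overlap (sse1 : List (Int × Int × List Int)) (sse2 : List (Int × Int × List Int)) (out : Bool) : Prop := out = synchronous_events_no_overlap_alt sse1 sse2
instance (sse1 : List (Int × Int × List Int)) (sse2 : List (Int × Int × List Int)) (out : Bool) : Decidable (Spec_synchronous_events_no_overlap sse1 sse2 out) := by unfold Spec_synchronous_events_no_overlap; infer_instance

-- ===== CLAIM (what is proved, stated in full; the proofs are below) =====
def Claim_equal_synchronous_events_no_overlap : Prop := ∀ (sse1 : List (Int × Int × List Int)) (sse2 : List (Int × Int × List Int)), Dom_synchronous_events_no_overlap sse1 sse2 → Spec_synchronous_events_no_overlap sse1 sse2 (synchronous_events_no_overlap sse1 sse2)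

-- ===== LEMMAS AND PROOFS =====

lemma set_equal_empty (v : PySem.Set Int) : PySem.Set.equal v PySem.Set.empty = v.isEmpty := by
  cases v <;> simp [PySem.Set.equal, PySem.Set.issubset, PySem.Set.empty, PySem.Set.contains]

lemma items_foldl_erase (l : List ((Int × Int) × PySem.Set Int)) (d : PySem.Dict (Int × Int) (PySem.Set Int)) :
    (l.foldl (fun acc e => if PySem.Set.equal e.2 PySem.Set.empty then acc.erase e.1 else acc) d).items
      = d.items.filter (fun p => !(l.filter (fun e => PySem.Set.equal e.2 PySem.Set.empty)).any (fun e => e.1 == p.1)) := by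
  induction l generalizing d with
  | nil => simp
  | cons e l ih =>
    simp only [List.foldl_cons, List.filter_cons]
    by_cases h : PySem.Set.equal e.2 PySem.Set.empty = true
    · rw [if_pos h, if_pos h, ih]
      simp [PySem.Dict.erase, List.filter_filter, Bool.and_comm, BEq.comm]
    · rw [if_neg h, if_neg h, ih]

lemma items_pvRemoveEmpty (d : PySem.Dict (Int × Int) (PySem.Set Int)) (hnd : d.keys.Nodup) :
    (pvRemoveEmpty d).items = d.items.filter (fun p => !p.2.isEmpty) := by
  rw [pvRemoveEmpty, items_foldl_erase]
  refine List.filter_congr ?_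
  intro p hp
  have key : ((d.items.filter (fun e => PySem.Set.equal e.2 PySem.Set.empty)).any (fun e => e.1 == p.1)) = p.2.isEmpty := by
    by_cases hv : (p.2 : PySem.Set Int).isEmpty = true
    · rw [hv]
      refine List.any_eq_true.mpr ⟨p, List.mem_filter.mpr ⟨hp, by rw [set_equal_empty, hv]⟩, by simp⟩
    · rw [Bool.eq_false_iff.mpr hv, List.any_eq_false]
      intro e he
      obtain ⟨ek, ev⟩ := e
      rcases List.mem_filter.mp he with ⟨hei, hee⟩
      rw [set_equal_empty] at hee
      intro hk
      have h1 := PySem.Dict.get?_of_mem_items d hei hnd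
      obtain ⟨pk, pv⟩ := p
      have h2 := PySem.Dict.get?_of_mem_items d hp hnd
      have hk' : ek = pk := eq_of_beq hk
      rw [hk', h2] at h1
      exact hv (by simpa [← Option.some_inj.mp h1] using hee)
  rw [key]

lemma nodup_keys_pvRemoveEmpty (d : PySem.Dict (Int × Int) (PySem.Set Int)) (hnd : d.keys.Nodup) :
    (pvRemoveEmpty d).keys.Nodup := by
  have : (pvRemoveEmpty d).keys.Sublist d.keys := by
    simp only [PySem.Dict.keys, items_pvRemoveEmpty d hnd]
    exact List.Sublist.map _ List.filter_sublist
  exact this.nodup hnd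

lemma get?_pvRemoveEmpty (d : PySem.Dict (Int × Int) (PySem.Set Int)) (hnd : d.keys.Nodup)
    (k : Int × Int) (v : PySem.Set Int) :
    (pvRemoveEmpty d).get? k = some v ↔ d.get? k = some v ∧ v.isEmpty = false := by
  rw [PySem.Dict.get?_eq_some_iff_mem_items _ _ _ (nodup_keys_pvRemoveEmpty d hnd),
      PySem.Dict.get?_eq_some_iff_mem_items _ _ _ hnd, items_pvRemoveEmpty d hnd, List.mem_filter]
  simp

lemma empty_pvRemoveEmpty (d : PySem.Dict (Int × Int) (PySem.Set Int)) (hnd : d.keys.Nodup) :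
    pvRemoveEmpty d = PySem.Dict.empty ↔ ∀ p ∈ d.items, (p.2 : PySem.Set Int).isEmpty = true := by
  rw [PySem.Dict.ext_iff, items_pvRemoveEmpty d hnd]
  simp [PySem.Dict.empty, List.filter_eq_nil_iff]

-- membership in the flattened pair set
lemma mem_pvFlat (d : PySem.Dict (Int × Int) (PySem.Set Int)) (hnd : d.keys.Nodup)
    (p : Int × Int) (x : Int) :
    (p, x) ∈ pvFlat d ↔ ∃ v, d.get? p = some v ∧ x ∈ v := by
  rw [pvFlat, PySem.Set.mem_ofList, List.mem_flatMap]
  constructor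
  · rintro ⟨e, he, hm⟩
    rcases List.mem_map.mp hm with ⟨y, hy, hxy⟩
    obtain ⟨hk, hx⟩ : e.1 = p ∧ y = x := by
      constructor <;> [exact congrArg Prod.fst hxy; exact congrArg Prod.snd hxy]
    refine ⟨e.2, ?_, hx ▸ hy⟩
    have := PySem.Dict.get?_of_mem_items d (by exact he) hnd
    rwa [hk] at this
  · rintro ⟨v, hg, hx⟩
    exact ⟨(p, v), (PySem.Dict.get?_eq_some_iff_mem_items _ _ _ hnd).mp hg,
      List.mem_map.mpr ⟨x, hx, rfl⟩⟩

lemma empty_pvFlat (d : PySem.Dict (Int × Int) (PySem.Set Int)) :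
    (pvFlat d).isEmpty = true ↔ ∀ p ∈ d.items, (p.2 : PySem.Set Int).isEmpty = true := by
  rw [List.isEmpty_iff, List.eq_nil_iff_forall_not_mem]
  constructor
  · intro h p hp
    rw [List.isEmpty_iff, List.eq_nil_iff_forall_not_mem]
    intro x hx
    exact h (p.1, x) (by
      rw [pvFlat, PySem.Set.mem_ofList, List.mem_flatMap]
      exact ⟨p, hp, List.mem_map.mpr ⟨x, hx, rfl⟩⟩)
  · intro h q hq
    rw [pvFlat, PySem.Set.mem_ofList, List.mem_flatMap] at hq
    rcases hq with ⟨e, he, hm⟩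
    rcases List.mem_map.mp hm with ⟨y, hy, _⟩
    rw [List.isEmpty_iff.mp (h e he)] at hy
    exact List.not_mem_nil hy

-- the common predicate both disjointness tests decide
def NoOv (d1 d2 : PySem.Dict (Int × Int) (PySem.Set Int)) : Prop :=
  ∀ (p : Int × Int) (v1 v2 : PySem.Set Int), d1.get? p = some v1 → d2.get? p = some v2 → ∀ x ∈ v1, x ∉ v2

lemma mem_keys_iff_get? (d : PySem.Dict (Int × Int) (PySem.Set Int)) (p : Int × Int) :
    p ∈ d.keys ↔ ∃ v, d.get? p = some v := by
  rw [← Option.ne_none_iff_exists']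
  exact not_iff_not.mp (by rw [not_not]; exact (PySem.Dict.get?_eq_none_iff_not_mem_keys d p).symm)

lemma disjoint_B_iff (d1 d2 : PySem.Dict (Int × Int) (PySem.Set Int))
    (h1 : d1.keys.Nodup) (h2 : d2.keys.Nodup) :
    PySem.Set.isdisjoint (pvFlat d1) (pvFlat d2) = true ↔ NoOv d1 d2 := by
  rw [PySem.Set.isdisjoint_iff]
  constructor
  · intro h p v1 v2 hg1 hg2 x hx hx2
    exact h (p, x) ((mem_pvFlat d1 h1 p x).mpr ⟨v1, hg1, hx⟩)
      ((mem_pvFlat d2 h2 p x).mpr ⟨v2, hg2, hx2⟩)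
  · rintro h ⟨p, x⟩ hm1 hm2
    rcases (mem_pvFlat d1 h1 p x).mp hm1 with ⟨v1, hg1, hx1⟩
    rcases (mem_pvFlat d2 h2 p x).mp hm2 with ⟨v2, hg2, hx2⟩
    exact h p v1 v2 hg1 hg2 x hx1 hx2

lemma all_A_iff (d1 d2 : PySem.Dict (Int × Int) (PySem.Set Int))
    (h1 : d1.keys.Nodup) (h2 : d2.keys.Nodup) :
    ((PySem.Set.inter (PySem.Set.ofList (pvRemoveEmpty d1).keys) (PySem.Set.ofList (pvRemoveEmpty d2).keys)).all
      (fun p => PySem.Set.isdisjoint ((pvRemoveEmpty d1).getD p PySem.Set.empty) ((pvRemoveEmpty d2).getD p PySem.Set.empty)) = true)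
    ↔ NoOv d1 d2 := by
  rw [List.all_eq_true]
  constructor
  · intro h p v1 v2 hg1 hg2 x hx hx2
    by_cases he1 : (v1 : PySem.Set Int).isEmpty = true
    · rw [List.isEmpty_iff.mp he1] at hx; exact (List.not_mem_nil).elim hx
    by_cases he2 : (v2 : PySem.Set Int).isEmpty = true
    · rw [List.isEmpty_iff.mp he2] at hx2; exact (List.not_mem_nil).elim hx2
    have hs1 : (pvRemoveEmpty d1).get? p = some v1 :=
      (get?_pvRemoveEmpty d1 h1 p v1).mpr ⟨hg1, Bool.eq_false_iff.mpr he1⟩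
    have hs2 : (pvRemoveEmpty d2).get? p = some v2 :=
      (get?_pvRemoveEmpty d2 h2 p v2).mpr ⟨hg2, Bool.eq_false_iff.mpr he2⟩
    have hm : p ∈ PySem.Set.inter (PySem.Set.ofList (pvRemoveEmpty d1).keys) (PySem.Set.ofList (pvRemoveEmpty d2).keys) := by
      rw [PySem.Set.mem_inter, PySem.Set.mem_ofList, PySem.Set.mem_ofList,
          mem_keys_iff_get?, mem_keys_iff_get?]
      exact ⟨⟨v1, hs1⟩, ⟨v2, hs2⟩⟩
    have := (PySem.Set.isdisjoint_iff _ _).mp (h p hm) x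
    rw [PySem.Dict.getD_eq_get?_getD, PySem.Dict.getD_eq_get?_getD, hs1, hs2] at this
    exact this hx hx2
  · intro h p hm
    rw [PySem.Set.mem_inter, PySem.Set.mem_ofList, PySem.Set.mem_ofList,
        mem_keys_iff_get?, mem_keys_iff_get?] at hm
    obtain ⟨⟨v1, hs1⟩, ⟨v2, hs2⟩⟩ := hm
    refine (PySem.Set.isdisjoint_iff _ _).mpr ?_
    rw [PySem.Dict.getD_eq_get?_getD, PySem.Dict.getD_eq_get?_getD, hs1, hs2]
    exact h p v1 v2 ((get?_pvRemoveEmpty d1 h1 p v1).mp hs1).1 ((get?_pvRemoveEmpty d2 h2 p v2).mp hs2).1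

lemma if_len_shape (c : List (Int × Int)) (f : Int × Int → Bool) :
    (if PySem.Set.len c = 0 then true else if c.all f then true else false) = c.all f := by
  cases c with
  | nil => simp [PySem.Set.len]
  | cons a c =>
    rw [if_neg (by simp [PySem.Set.len]; omega)]
    cases (a :: c).all f <;> rfl

lemma core_eq (d1 d2 : PySem.Dict (Int × Int) (PySem.Set Int))
    (h1 : d1.keys.Nodup) (h2 : d2.keys.Nodup) : pvNoOverlapA d1 d2 = pvNoOverlapB d1 d2 := by
  simp only [pvNoOverlapA, pvNoOverlapB]
  have hc : (pvRemoveEmpty d1 = PySem.Dict.empty ∧ pvRemoveEmpty d2 = PySem.Dict.empty)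
      ↔ ((pvFlat d1).isEmpty = true ∧ (pvFlat d2).isEmpty = true) := by
    rw [empty_pvRemoveEmpty d1 h1, empty_pvRemoveEmpty d2 h2, empty_pvFlat, empty_pvFlat]
  by_cases hb : (pvRemoveEmpty d1 = PySem.Dict.empty ∧ pvRemoveEmpty d2 = PySem.Dict.empty)
  · rw [if_pos hb, if_pos (hc.mp hb)]
  · rw [if_neg hb, if_neg (fun hx => hb (hc.mpr hx)), if_len_shape]
    rw [Bool.eq_iff_iff, all_A_iff d1 d2 h1 h2, disjoint_B_iff d1 d2 h1 h2]

lemma nodup_keys_pvToDict (sse : List (Int × Int × List Int)) : (pvToDict sse).keys.Nodup :=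
  PySem.Dict.nodup_keys_foldl_insert_key sse (fun e => (e.1, e.2.1)) _ _ PySem.Dict.nodup_keys_empty

-- ===== VERDICT (by name: the statement is the Claim_ definition above) =====
theorem synchronous_events_no_overlap_spec : Claim_equal_synchronous_events_no_overlap := by
  intro sse1 sse2 _
  unfold Spec_synchronous_events_no_overlap synchronous_events_no_overlap synchronous_events_no_overlap_alt
  exact core_eq _ _ (nodup_keys_pvToDict sse1) (nodup_keys_pvToDict sse2)
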